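-- pv_equiv track=rewrite | github.com/CIAM-Group/EvolutionaryAlgorithm_Codes | MOEAD-RD/MOEAD_MD/routing.py | get_sub_sol
-- ===== SOURCE A (Python) =====
-- def get_sub_sol(sol, must_visted_dict):
--     """
-- 	param: sol: ["platCode", ...]
-- 		   must_visted_dict: {"platCode": True/False, ...}
-- 	return: subsol: [["platCode", ...], ...]
-- 	"""
--     sub_sols = []
--     end_pointer = len(sol)
--     start_pointer = len(sol)
--     for platform in reversed(sol):
--         start_pointer -= 1
--         if must_visted_dict[platform]:
--             sub_sols.append([x for x in sol[start_pointer:end_pointer]])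
--             end_pointer = start_pointer
--     if must_visted_dict[sol[0]] is False:
--         sub_sols.append([x for x in sol[0:end_pointer]])
--     return sub_sols
-- ===== SOURCE B (Python) =====
-- def get_sub_sol(sol, must_visted_dict):
--     # Single forward pass with a running segment accumulator (no index pointers,
--     # no slicing): a must-visit platform closes the open segment and starts a new
--     # one; the list of segments is reversed once at the end.
--     segments = []
--     current = []
--     for p in sol:
--         if must_visted_dict[p] and current:
--             segments.append(current)
--             current = []
--         current.append(p)
--     if current:
--         segments.append(current)
--     segments.reverse()
--     return segments
-- ===== Notes on version B (the rewrite author's own statement) =====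
-- stated objective: alternative
-- what changed: A walks the list backwards with two index pointers and emits copied slices; B makes one forward pass with a running segment accumulator (no indices, no slicing) and reverses the segment list once at the end.
import Mathlib
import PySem

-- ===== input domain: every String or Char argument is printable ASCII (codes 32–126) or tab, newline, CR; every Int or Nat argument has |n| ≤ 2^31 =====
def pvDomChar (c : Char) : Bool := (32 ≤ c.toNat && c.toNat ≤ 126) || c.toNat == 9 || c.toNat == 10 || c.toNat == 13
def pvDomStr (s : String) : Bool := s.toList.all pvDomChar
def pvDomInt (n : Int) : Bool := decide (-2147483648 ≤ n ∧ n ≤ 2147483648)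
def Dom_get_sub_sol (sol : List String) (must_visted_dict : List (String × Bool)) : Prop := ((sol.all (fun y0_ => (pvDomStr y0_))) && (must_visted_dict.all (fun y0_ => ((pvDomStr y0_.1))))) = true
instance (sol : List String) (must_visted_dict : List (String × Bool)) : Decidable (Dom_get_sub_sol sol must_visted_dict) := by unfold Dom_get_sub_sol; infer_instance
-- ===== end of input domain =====

-- B replaces A's backward two-pointer slicing scan by a single forward pass with a
-- running segment accumulator (alternative decomposition, same asymptotic cost).


-- ===== PORT A =====
-- Literal port of A: backward loop over reversed sol with start/end pointers,
-- appending copied slices.  Dict lookups are totalized with getD false and the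
-- final sol[0] with headD "": Python raises KeyError/IndexError exactly on the
-- inputs Pre_ excludes, so the defaults are never reached inside Pre_.
def get_sub_sol (sol : List String) (must_visted_dict : List (String × Bool)) : List (List String) :=
  let d := PySem.Dict.mk must_visted_dict
  let n : Int := sol.length
  let st := sol.reverse.foldl
    (fun (st : List (List String) × Int × Int) platform =>
      let sub_sols := st.1
      let end_pointer := st.2.1
      let start_pointer := st.2.2 - 1
      if d.getD platform false then
        (sub_sols ++ [PySem.List.slice sol (some start_pointer) (some end_pointer)],
         start_pointer, start_pointer)
      else
        (sub_sols, end_pointer, start_pointer))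
    ([], n, n)
  if d.getD (sol.headD "") false = false then
    st.1 ++ [PySem.List.slice sol (some 0) (some st.2.1)]
  else
    st.1

-- ===== PORT B =====
-- Literal port of B: one forward fold carrying (segments, current); a must-visit
-- platform with a nonempty current segment flushes it; final flush, then reverse.
def get_sub_sol_alt (sol : List String) (must_visted_dict : List (String × Bool)) : List (List String) :=
  let d := PySem.Dict.mk must_visted_dict
  let st := sol.foldl
    (fun (st : List (List String) × List String) p =>
      if d.getD p false && !st.2.isEmpty then (st.1 ++ [st.2], [p])
      else (st.1, st.2 ++ [p]))
    ([], [])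
  let segments := if !st.2.isEmpty then st.1 ++ [st.2] else st.1
  segments.reverse

-- ===== PRECONDITION & SPEC =====
-- Pre_ excludes exactly the inputs where Python A raises: empty sol (IndexError at
-- sol[0]) and sol containing a platform absent from must_visted_dict (KeyError).
def Pre_get_sub_sol (sol : List String) (must_visted_dict : List (String × Bool)) : Prop :=
  sol ≠ [] ∧ ∀ p ∈ sol, (PySem.Dict.mk must_visted_dict).contains p = true
instance (sol : List String) (must_visted_dict : List (String × Bool)) : Decidable (Pre_get_sub_sol sol must_visted_dict) := by unfold Pre_get_sub_sol; infer_instance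

def pvWitness_get_sub_sol : List String × (List (String × Bool)) :=
  (["a", "b", "c"], [("a", true), ("b", false), ("c", true)])

def Spec_get_sub_sol (sol : List String) (must_visted_dict : List (String × Bool)) (out : List (List String)) : Prop := out = get_sub_sol_alt sol must_visted_dict
instance (sol : List String) (must_visted_dict : List (String × Bool)) (out : List (List String)) : Decidable (Spec_get_sub_sol sol must_visted_dict out) := by unfold Spec_get_sub_sol; infer_instance

-- ===== CLAIM (what is proved, stated in full; the proofs are below) =====
def Claim_equal_get_sub_sol : Prop := ∀ (sol : List String) (must_visted_dict : List (String × Bool)), Dom_get_sub_sol sol must_visted_dict → Pre_get_sub_sol sol must_visted_dict → Spec_get_sub_sol sol must_visted_dict (get_sub_sol sol must_visted_dict)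

-- ===== LEMMAS AND PROOFS =====


-- maximal unflagged prefix of a platform list
def pvLead (d : PySem.Dict String Bool) : List String → List String
  | [] => []
  | x :: xs => if d.getD x false then [] else x :: pvLead d xs

-- forward segments, each headed by a flagged platform
def pvFgroups (d : PySem.Dict String Bool) : List String → List (List String)
  | [] => []
  | x :: xs => if d.getD x false then (x :: pvLead d xs) :: pvFgroups d xs else pvFgroups d xs

theorem pvLead_take (d : PySem.Dict String Bool) (xs : List String) :
    xs.take (pvLead d xs).length = pvLead d xs := by
  induction xs with
  | nil => simp [pvLead]
  | cons x xs ih =>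
    by_cases h : d.getD x false
    · simp [pvLead, h]
    · simp [pvLead, h, ih]

-- A's backward pointer loop, characterised over an arbitrary suffix of sol
theorem pvA_loop (d : PySem.Dict String Bool) (sol : List String) (suf : List String) :
    ∀ pre : List String, sol = pre ++ suf →
    suf.reverse.foldl
      (fun (st : List (List String) × Int × Int) platform =>
        let sub_sols := st.1
        let end_pointer := st.2.1
        let start_pointer := st.2.2 - 1
        if d.getD platform false then
          (sub_sols ++ [PySem.List.slice sol (some start_pointer) (some end_pointer)],
           start_pointer, start_pointer)
        else
          (sub_sols, end_pointer, start_pointer))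
      ([], (sol.length : Int), (sol.length : Int))
    = ((pvFgroups d suf).reverse,
       (pre.length : Int) + ((pvLead d suf).length : Int), (pre.length : Int)) := by
  induction suf with
  | nil =>
    intro pre h
    subst h
    simp [pvFgroups, pvLead]
  | cons x xs ih =>
    intro pre h
    have h' : sol = (pre ++ [x]) ++ xs := by simp [h]
    rw [List.reverse_cons, List.foldl_append, ih (pre ++ [x]) h']
    simp only [List.foldl_cons, List.foldl_nil, List.length_append, List.length_cons,
      List.length_nil]
    by_cases hf : d.getD x false
    · have hs : ((pre.length + 1 : Nat) : Int) - 1 = ((pre.length : Nat) : Int) := by push_cast; ring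
      have he : ((pre.length + 1 : Nat) : Int) + ((pvLead d xs).length : Int)
          = ((pre.length + 1 + (pvLead d xs).length : Nat) : Int) := by push_cast; ring
      have hdrop : sol.drop pre.length = x :: xs := by
        rw [h, List.drop_left]
      have hslice : PySem.List.slice sol (some ((pre.length : Nat) : Int))
            (some ((pre.length + 1 + (pvLead d xs).length : Nat) : Int))
          = x :: pvLead d xs := by
        rw [PySem.List.slice_natCast, hdrop]
        have : pre.length + 1 + (pvLead d xs).length - pre.length = (pvLead d xs).length + 1 := by omega
        rw [this, List.take_succ_cons, pvLead_take]
      simp only [hf, if_true, hs, he, hslice]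
      rw [pvFgroups, pvLead]
      simp [hf]
    · rw [pvFgroups, pvLead]
      simp only [hf, Bool.false_eq_true, if_false, Prod.mk.injEq]
      refine ⟨trivial, ?_, by push_cast; ring⟩
      simp only [List.length_cons]
      push_cast; ring

-- B's forward loop, characterised with an open current segment
def pvFin (d : PySem.Dict String Bool) (cur : List String) : List String → List (List String) × List String
  | [] => ([], cur)
  | x :: xs =>
    if d.getD x false then (cur :: (pvFin d [x] xs).1, (pvFin d [x] xs).2)
    else pvFin d (cur ++ [x]) xs

theorem pvB_loop (d : PySem.Dict String Bool) (xs : List String) :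
    ∀ (segs : List (List String)) (cur : List String), cur ≠ [] →
    xs.foldl
      (fun (st : List (List String) × List String) p =>
        if d.getD p false && !st.2.isEmpty then (st.1 ++ [st.2], [p])
        else (st.1, st.2 ++ [p]))
      (segs, cur)
    = (segs ++ (pvFin d cur xs).1, (pvFin d cur xs).2) := by
  induction xs with
  | nil => intro segs cur _; simp [pvFin]
  | cons x xs ih =>
    intro segs cur hcur
    rw [List.foldl_cons]
    by_cases hf : d.getD x false
    · have hne : cur.isEmpty = false := by simp [hcur]
      simp only [hf, hne, Bool.not_false, Bool.true_and, if_true]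
      rw [ih (segs ++ [cur]) [x] (by simp), pvFin]
      simp [hf]
    · simp only [hf, Bool.false_and, Bool.false_eq_true, if_false]
      rw [ih segs (cur ++ [x]) (by simp), pvFin]
      simp [hf]

theorem pvFin_snd_ne (d : PySem.Dict String Bool) (xs : List String) :
    ∀ cur : List String, cur ≠ [] → (pvFin d cur xs).2 ≠ [] := by
  induction xs with
  | nil => intro cur h; simpa [pvFin] using h
  | cons x xs ih =>
    intro cur hcur
    by_cases hf : d.getD x false
    · rw [pvFin]; simp only [hf, if_true]; exact ih [x] (by simp)
    · rw [pvFin]; simp only [hf, Bool.false_eq_true, if_false]; exact ih (cur ++ [x]) (by simp)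

theorem pvFin_spec (d : PySem.Dict String Bool) (xs : List String) :
    ∀ cur : List String,
    (pvFin d cur xs).1 ++ [(pvFin d cur xs).2] = (cur ++ pvLead d xs) :: pvFgroups d xs := by
  induction xs with
  | nil => intro cur; simp [pvFin, pvLead, pvFgroups]
  | cons x xs ih =>
    intro cur
    by_cases hf : d.getD x false
    · rw [pvFin, pvLead, pvFgroups]
      simp only [hf, if_true, List.cons_append, List.append_nil]
      rw [ih [x]]
      simp
    · rw [pvFin, pvLead, pvFgroups]
      simp only [hf, Bool.false_eq_true, if_false]
      rw [ih (cur ++ [x])]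
      simp


-- ===== VERDICT (by name: the statement is the Claim_ definition above) =====
theorem get_sub_sol_spec : Claim_equal_get_sub_sol := by
  unfold Claim_equal_get_sub_sol
  intro sol mv _ hpre
  obtain ⟨hne, -⟩ := hpre
  obtain ⟨y, ys, rfl⟩ := List.exists_cons_of_ne_nil hne
  simp only [Spec_get_sub_sol, get_sub_sol, get_sub_sol_alt]
  rw [pvA_loop (PySem.Dict.mk mv) (y :: ys) (y :: ys) [] rfl]
  simp only [List.foldl_cons, List.isEmpty_nil, Bool.not_true, Bool.and_false,
    Bool.false_eq_true, if_false, List.nil_append]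
  rw [pvB_loop (PySem.Dict.mk mv) ys [] [y] (by simp)]
  have hfin : (!(pvFin (PySem.Dict.mk mv) [y] ys).2.isEmpty) = true := by
    simpa [List.isEmpty_iff] using pvFin_snd_ne (PySem.Dict.mk mv) ys [y] (by simp)
  simp only [List.nil_append, hfin, if_true]
  rw [pvFin_spec (PySem.Dict.mk mv) ys [y]]
  simp only [List.headD_cons, List.length_nil, Nat.cast_zero, zero_add]
  by_cases hy : (PySem.Dict.mk mv).getD y false
  · rw [if_neg (by simp [hy])]
    rw [pvFgroups]; simp [hy]
  · rw [if_pos (by simp [hy])]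
    rw [PySem.List.slice_zero_start, PySem.List.slice_to_natCast, pvLead_take]
    rw [pvFgroups, pvLead]
    simp [hy]
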